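-- pv_equiv track=rewrite | github.com/Abstractigakis/aoc-2022 | 8/a.py | checkVisibleTreesFromRight
-- ===== SOURCE A (Python) =====
-- def checkVisibleTreesFromRight(X):
--     visibleTrees = set()
--     for i in range(len(X)):
--         tallestTree = -1
--         for j in range(len(X[i])-1,0,-1):
--             if X[i][j] > tallestTree:
--                 tallestTree = X[i][j]
--                 visibleTrees.add((i,j))
--     return visibleTrees
-- ===== SOURCE B (Python) =====
-- def checkVisibleTreesFromRight(X):
--     visibleTrees = set()
--     for i, row in enumerate(X):
--         for j in range(len(row) - 1, 0, -1):
--             if row[j] > max([-1] + row[j+1:]):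
--                 visibleTrees.add((i, j))
--     return visibleTrees
-- ===== Notes on version B (the rewrite author's own statement) =====
-- stated objective: simpler
-- what changed: Replaces the running-maximum accumulator pass with a per-cell rescan: a cell is marked iff it is taller than max([-1] + suffix to its right), removing the mutable tallestTree state (and iterating rows with enumerate).
import Mathlib
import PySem

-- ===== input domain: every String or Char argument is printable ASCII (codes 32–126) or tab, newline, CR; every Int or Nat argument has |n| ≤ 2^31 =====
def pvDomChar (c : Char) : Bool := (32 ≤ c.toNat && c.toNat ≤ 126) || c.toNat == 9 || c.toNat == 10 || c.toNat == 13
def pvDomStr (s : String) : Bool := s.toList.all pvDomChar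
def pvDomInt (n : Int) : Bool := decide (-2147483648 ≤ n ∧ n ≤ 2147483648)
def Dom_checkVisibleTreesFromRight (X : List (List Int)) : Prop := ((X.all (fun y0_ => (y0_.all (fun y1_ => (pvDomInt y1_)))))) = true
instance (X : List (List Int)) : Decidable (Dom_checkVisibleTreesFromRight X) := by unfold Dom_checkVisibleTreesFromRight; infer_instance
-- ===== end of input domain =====

-- B drops A's running-maximum state: a cell is visible iff taller than max([-1] + suffix); same result, no accumulator (objective: simpler).

-- ===== PORT A =====
def checkVisibleTreesFromRight (X : List (List Int)) : List (Int × Int) :=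
  (PySem.List.pyRange 0 (X.length : Int) 1).foldl (fun vt i =>
    let row := PySem.List.pyGetD X i []
    ((PySem.List.pyRange ((row.length : Int) - 1) 0 (-1)).foldl
      (fun (st : Int × PySem.Set (Int × Int)) j =>
        if PySem.List.pyGetD row j 0 > st.1
        then (PySem.List.pyGetD row j 0, PySem.Set.add st.2 (i, j))
        else st) ((-1 : Int), vt)).2)
    PySem.Set.empty

-- ===== PORT B =====
def checkVisibleTreesFromRight_alt (X : List (List Int)) : List (Int × Int) :=
  (PySem.List.enumerate X).foldl (fun vt p =>
    (PySem.List.pyRange ((p.2.length : Int) - 1) 0 (-1)).foldl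
      (fun vt j =>
        -- max([-1] + row[j+1:]): the list is nonempty, so maxD's default is never used
        if PySem.List.pyGetD p.2 j 0 >
            PySem.List.maxD ((-1) :: PySem.List.slice p.2 (some (j + 1)) none) (fun y => y) (-1)
        then PySem.Set.add vt (p.1, j) else vt) vt)
    PySem.Set.empty

-- ===== PRECONDITION & SPEC =====
def Spec_checkVisibleTreesFromRight (X : List (List Int)) (out : List (Int × Int)) : Prop := out = checkVisibleTreesFromRight_alt X
instance (X : List (List Int)) (out : List (Int × Int)) : Decidable (Spec_checkVisibleTreesFromRight X out) := by unfold Spec_checkVisibleTreesFromRight; infer_instance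

-- ===== CLAIM (what is proved, stated in full; the proofs are below) =====
def Claim_equal_checkVisibleTreesFromRight : Prop := ∀ (X : List (List Int)), Dom_checkVisibleTreesFromRight X → Spec_checkVisibleTreesFromRight X (checkVisibleTreesFromRight X)

-- ===== LEMMAS AND PROOFS =====

theorem pvFoldlMaxComm (l : List Int) : ∀ (a x : Int), l.foldl max (max a x) = max x (l.foldl max a) := by
  induction l with
  | nil => intro a x; simp [max_comm]
  | cons y t ih =>
      intro a x
      simp only [List.foldl_cons]
      rw [max_right_comm a x y, ih]

-- the two inner loops agree: A's running max t equals B's max([-1] + suffix) at every step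
theorem pvInnerEq (r : List Int) (i : Int) : ∀ (n : Nat), n < r.length → ∀ (vt : PySem.Set (Int × Int)),
    ((PySem.List.pyRange (n : Int) 0 (-1)).foldl
      (fun (st : Int × PySem.Set (Int × Int)) j =>
        if PySem.List.pyGetD r j 0 > st.1
        then (PySem.List.pyGetD r j 0, PySem.Set.add st.2 (i, j))
        else st) (((r.drop (n + 1)).foldl max (-1), vt))).2
    = (PySem.List.pyRange (n : Int) 0 (-1)).foldl
      (fun vt j =>
        if PySem.List.pyGetD r j 0 >
            PySem.List.maxD ((-1) :: PySem.List.slice r (some (j + 1)) none) (fun y => y) (-1)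
        then PySem.Set.add vt (i, j) else vt) vt := by
  intro n
  induction n with
  | zero => intro _ vt; rw [PySem.List.pyRange_neg_one_eq_nil (by omega)]; simp
  | succ m ih =>
      intro hn vt
      rw [PySem.List.pyRange_neg_one_cons (by exact_mod_cast Nat.succ_pos m)]
      have hcast : ((m + 1 : Nat) : Int) - 1 = (m : Int) := by push_cast; ring
      simp only [List.foldl_cons, hcast]
      -- identify x, t and the drop decomposition
      have hx : PySem.List.pyGetD r ((m + 1 : Nat) : Int) 0 = r[m + 1]'hn := by
        rw [PySem.List.pyGetD_natCast]; exact List.getD_eq_getElem r 0 hn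
      have hdrop : r.drop (m + 1) = r[m + 1]'hn :: r.drop (m + 2) := by
        rw [List.drop_eq_getElem_cons hn]
      have hslice : PySem.List.slice r (some (((m + 1 : Nat) : Int) + 1)) none = r.drop (m + 2) := by
        have : (((m + 1 : Nat) : Int) + 1) = ((m + 2 : Nat) : Int) := by push_cast; ring
        rw [this, PySem.List.slice_from_natCast]
      have hmaxD : PySem.List.maxD ((-1) :: PySem.List.slice r (some (((m + 1 : Nat) : Int) + 1)) none)
          (fun y => y) (-1) = (r.drop (m + 2)).foldl max (-1) := by
        rw [hslice]
        simp [PySem.List.maxD, PySem.List.max?_id_cons]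
      set x := r[m + 1]'hn with hxdef
      set t := (r.drop (m + 2)).foldl max (-1) with htdef
      have hstate : (r.drop (m + 1)).foldl max (-1) = max x t := by
        rw [hdrop]
        simp only [List.foldl_cons]
        rw [pvFoldlMaxComm]
      rw [hx, hmaxD]
      by_cases hc : x > t
      · rw [if_pos hc, if_pos hc]
        have ih' := ih (by omega) (PySem.Set.add vt (i, ((m + 1 : Nat) : Int)))
        rw [hstate, show max x t = x from by omega] at ih'
        exact ih'
      · rw [if_neg hc, if_neg hc]
        have ih' := ih (by omega) vt
        rw [hstate, show max x t = t from by omega] at ih'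
        exact ih'

theorem pvRowEq (r : List Int) (i : Int) (vt : PySem.Set (Int × Int)) :
    ((PySem.List.pyRange ((r.length : Int) - 1) 0 (-1)).foldl
      (fun (st : Int × PySem.Set (Int × Int)) j =>
        if PySem.List.pyGetD r j 0 > st.1
        then (PySem.List.pyGetD r j 0, PySem.Set.add st.2 (i, j))
        else st) (((-1 : Int), vt))).2
    = (PySem.List.pyRange ((r.length : Int) - 1) 0 (-1)).foldl
      (fun vt j =>
        if PySem.List.pyGetD r j 0 >
            PySem.List.maxD ((-1) :: PySem.List.slice r (some (j + 1)) none) (fun y => y) (-1)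
        then PySem.Set.add vt (i, j) else vt) vt := by
  cases hr : r with
  | nil => rw [PySem.List.pyRange_neg_one_eq_nil (by simp)]; simp
  | cons y ys =>
      rw [← hr]
      have hlen : 0 < r.length := by rw [hr]; simp
      have hc : ((r.length : Int) - 1) = ((r.length - 1 : Nat) : Int) := by
        push_cast [hlen]; ring
      have hdrop : r.drop ((r.length - 1) + 1) = [] := by
        apply List.drop_eq_nil_of_le; omega
      have := pvInnerEq r i (r.length - 1) (by omega) vt
      rw [hdrop] at this
      simpa [hc] using this

theorem checkVisibleTreesFromRight_eq_alt (X : List (List Int)) :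
    checkVisibleTreesFromRight X = checkVisibleTreesFromRight_alt X := by
  unfold checkVisibleTreesFromRight checkVisibleTreesFromRight_alt
  rw [PySem.List.enumerate_eq_map_pyRange X [], List.foldl_map]
  simp only [PySem.List.len]
  apply PySem.List.foldl_congr_mem
  intro vt i _
  exact pvRowEq (PySem.List.pyGetD X i []) i vt

-- ===== VERDICT (by name: the statement is the Claim_ definition above) =====
theorem checkVisibleTreesFromRight_spec : Claim_equal_checkVisibleTreesFromRight := by
  intro X _
  unfold Spec_checkVisibleTreesFromRight
  exact checkVisibleTreesFromRight_eq_alt X
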